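-- pv_equiv track=rewrite | github.com/wwrzesien/web-scraper | scraper.py | get_feature_from_line
-- ===== SOURCE A (Python) =====
-- def get_feature_from_line(words):
--     """Extract features from list of words."""
--     for idx, word in enumerate(words):
--         if ':' in word:
--             colon_pos = idx
--     key = ' '.join(words[:colon_pos+1]).replace(':', '')
--     key = key.replace(' ', '_')
--     value = ' '.join(words[colon_pos+1:])
--     return key, value
-- ===== SOURCE B (Python) =====
-- def get_feature_from_line(words):
--     """Extract features from list of words."""
--     def split_at_last_colon(ws):
--         if not ws:
--             return None
--         tail = split_at_last_colon(ws[1:])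
--         if tail is not None:
--             return ([ws[0]] + tail[0], tail[1])
--         if ':' in ws[0]:
--             return ([ws[0]], list(ws[1:]))
--         return None
--     head, rest = split_at_last_colon(words)  # raises TypeError if no word has a colon (A raises NameError there)
--     key = ' '.join(head).replace(':', '').replace(' ', '_')
--     value = ' '.join(rest)
--     return key, value
-- ===== Notes on version B (the rewrite author's own statement) =====
-- stated objective: alternative
-- what changed: A tracks the index of the last colon-bearing word in an indexed forward loop and then slices the list at that index; B is a structural recursion that returns the (key-words, value-words) partition directly, with no indices and no index-based slicing.
import Mathlib
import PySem

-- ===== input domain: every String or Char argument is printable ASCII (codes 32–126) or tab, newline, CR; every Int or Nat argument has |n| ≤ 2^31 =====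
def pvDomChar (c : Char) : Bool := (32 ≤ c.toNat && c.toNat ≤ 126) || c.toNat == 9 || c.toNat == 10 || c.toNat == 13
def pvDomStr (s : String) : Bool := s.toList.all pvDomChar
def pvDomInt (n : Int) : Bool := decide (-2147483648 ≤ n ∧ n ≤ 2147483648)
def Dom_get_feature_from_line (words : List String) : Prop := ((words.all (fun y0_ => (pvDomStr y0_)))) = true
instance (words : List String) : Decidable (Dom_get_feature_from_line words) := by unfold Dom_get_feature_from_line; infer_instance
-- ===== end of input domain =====

-- B replaces A's indexed forward scan + list slicing by a structural recursion that
-- returns the (key words, value words) partition at the last colon directly (alternative decomposition).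


-- ===== PORT A =====
-- A's loop: for idx, word in enumerate(words): if ':' in word: colon_pos = idx
def pvFwdScan (words : List String) : Option Int :=
  (PySem.List.enumerate words 0).foldl
    (fun acc iw => if PySem.Str.isIn ":" iw.2 then some iw.1 else acc) none

def get_feature_from_line (words : List String) : String × String :=
  match pvFwdScan words with
  | none => ("", "")  -- Python raises NameError here; excluded by Pre_
  | some colon_pos =>
    let key := PySem.Str.replace (PySem.Str.join " " (PySem.List.slice words none (some (colon_pos + 1)))) ":" ""
    let key := PySem.Str.replace key " " "_"
    let value := PySem.Str.join " " (PySem.List.slice words (some (colon_pos + 1)) none)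
    (key, value)

-- ===== PORT B =====
-- B's helper split_at_last_colon: recurse on the tail first; if the tail splits, prepend
-- the head word to the key part; otherwise split here iff the head word contains ':'.
def pvSplitLast : List String → Option (List String × List String)
  | [] => none
  | w :: ws =>
    match pvSplitLast ws with
    | some (k, v) => some (w :: k, v)
    | none => if PySem.Str.isIn ":" w then some ([w], ws) else none

def get_feature_from_line_alt (words : List String) : String × String :=
  match pvSplitLast words with
  | none => ("", "")  -- Python raises TypeError here; excluded by Pre_
  | some (head, rest) =>
    let key := PySem.Str.replace (PySem.Str.replace (PySem.Str.join " " head) ":" "") " " "_"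
    let value := PySem.Str.join " " rest
    (key, value)

-- ===== PRECONDITION & SPEC =====
-- Pre_ excludes lists in which no word contains ':' — there A raises NameError (B raises TypeError).
def Pre_get_feature_from_line (words : List String) : Prop :=
  (words.any (fun w => PySem.Str.isIn ":" w)) = true
instance (words : List String) : Decidable (Pre_get_feature_from_line words) := by
  unfold Pre_get_feature_from_line; infer_instance

def pvWitness_get_feature_from_line : List String := ["name:", "John"]

def Spec_get_feature_from_line (words : List String) (out : String × String) : Prop := out = get_feature_from_line_alt words
instance (words : List String) (out : String × String) : Decidable (Spec_get_feature_from_line words out) := by unfold Spec_get_feature_from_line; infer_instance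

-- ===== CLAIM =====
def Claim_equal_get_feature_from_line : Prop := ∀ (words : List String), Dom_get_feature_from_line words → Pre_get_feature_from_line words → Spec_get_feature_from_line words (get_feature_from_line words)

-- ===== LEMMAS AND PROOFS =====

-- index of the last colon-bearing word, as a Nat (proof-only characterisation)
def pvLastIdx : List String → Option Nat
  | [] => none
  | w :: ws =>
    match pvLastIdx ws with
    | some n => some (n + 1)
    | none => if PySem.Str.isIn ":" w then some 0 else none

lemma splitLast_eq (ws : List String) :
    pvSplitLast ws = (pvLastIdx ws).map (fun n => (ws.take (n + 1), ws.drop (n + 1))) := by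
  induction ws with
  | nil => rfl
  | cons w ws ih =>
    simp only [pvSplitLast, pvLastIdx, ih]
    cases h : pvLastIdx ws with
    | none => split_ifs <;> rfl
    | some n => rfl

lemma lastIdx_append (xs : List String) (x : String) :
    pvLastIdx (xs ++ [x]) =
      if PySem.Str.isIn ":" x then some xs.length else pvLastIdx xs := by
  induction xs with
  | nil => simp [pvLastIdx]
  | cons w ws ih =>
    have hstep : pvLastIdx (w :: (ws ++ [x]))
        = match pvLastIdx (ws ++ [x]) with
          | some n => some (n + 1)
          | none => if PySem.Str.isIn ":" w then some 0 else none := rfl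
    rw [List.cons_append, hstep, ih]
    by_cases h : PySem.Str.isIn ":" x = true
    · rw [if_pos h, if_pos h]; simp
    · rw [if_neg h, if_neg h]; rfl

lemma fwd_eq_lastIdx (words : List String) :
    pvFwdScan words = (pvLastIdx words).map (fun n => (n : Int)) := by
  induction words using List.reverseRecOn with
  | nil => rfl
  | append_singleton xs x ih =>
    have hA : pvFwdScan (xs ++ [x])
        = if PySem.Str.isIn ":" x then some (xs.length : Int) else pvFwdScan xs := by
      unfold pvFwdScan
      rw [PySem.List.enumerate_append, List.foldl_append]
      simp
    rw [hA, lastIdx_append]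
    split_ifs with h
    · rfl
    · exact ih

lemma lastIdx_isSome {ws : List String}
    (h : ∃ w ∈ ws, PySem.Str.isIn ":" w = true) :
    ∃ n, pvLastIdx ws = some n := by
  induction ws with
  | nil => simp at h
  | cons w rest ih =>
    simp only [pvLastIdx]
    cases hr : pvLastIdx rest with
    | some n => exact ⟨n + 1, rfl⟩
    | none =>
      obtain ⟨v, hv, hvc⟩ := h
      rw [List.mem_cons] at hv
      rcases hv with hv | hv
      · exact ⟨0, by rw [if_pos (hv ▸ hvc)]⟩
      · obtain ⟨n, hn⟩ := ih ⟨v, hv, hvc⟩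
        exact absurd hn (by simp [hr])

-- ===== VERDICT =====
theorem get_feature_from_line_spec : Claim_equal_get_feature_from_line := by
  intro words _ hpre
  unfold Pre_get_feature_from_line at hpre
  rw [List.any_eq_true] at hpre
  obtain ⟨n, hn⟩ := lastIdx_isSome hpre
  have h2 : pvFwdScan words = some ((n : Int)) := by rw [fwd_eq_lastIdx, hn]; rfl
  have h3 : pvSplitLast words = some (words.take (n + 1), words.drop (n + 1)) := by
    rw [splitLast_eq, hn]; rfl
  have h1 : ((n : Int) + 1) = ((n + 1 : Nat) : Int) := by push_cast; ring
  unfold Spec_get_feature_from_line get_feature_from_line get_feature_from_line_alt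
  rw [h2, h3]
  simp only [h1, PySem.List.slice_to_natCast, PySem.List.slice_from_natCast]
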